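-- pv_equiv track=rewrite | github.com/starrQWQ/python_code | RSA/RSA.py | GetTextFromBlocks
-- ===== SOURCE A (Python) =====
-- BLOCKSIZE=128
--
-- BYTESIZE=256
--
-- def GetTextFromBlocks(blockints,messagelenth,):
--     message=[]
--     for blockint in blockints:
--         blockmessage=[]
--         for i in range(BLOCKSIZE-1,-1,-1):
--             if len(message)+i<messagelenth:
--                 ascii=blockint//(BYTESIZE**i)
--                 blockint=blockint%(BYTESIZE**i)
--                 blockmessage.insert(0,chr(ascii))
--         message.extend(blockmessage)
--     return ' '.join(message)
-- ===== SOURCE B (Python) =====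
-- BLOCKSIZE = 128
-- BYTESIZE = 256
--
-- def GetTextFromBlocks(blockints, messagelenth):
--     message = []
--     for j, blockint in enumerate(blockints):
--         k = min(BLOCKSIZE, messagelenth - BLOCKSIZE * j)
--         for _ in range(k):
--             blockint, r = divmod(blockint, BYTESIZE)
--             message.append(chr(r))
--     return ' '.join(message)
-- ===== Notes on version B (the rewrite author's own statement) =====
-- stated objective: faster
-- what changed: B replaces A's per-digit big-power arithmetic (computing 256**i and dividing/modding the whole block by it for each i, with an insert(0) per char) by a single pass of divmod-by-256 per block that emits the digits least-significant-first in append order, with the per-block character count obtained in closed form from the block index.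
-- outside the precondition, e.g. on GetTextFromBlocks([300], 1): A returns 'Ĭ', B returns ','
import Mathlib
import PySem

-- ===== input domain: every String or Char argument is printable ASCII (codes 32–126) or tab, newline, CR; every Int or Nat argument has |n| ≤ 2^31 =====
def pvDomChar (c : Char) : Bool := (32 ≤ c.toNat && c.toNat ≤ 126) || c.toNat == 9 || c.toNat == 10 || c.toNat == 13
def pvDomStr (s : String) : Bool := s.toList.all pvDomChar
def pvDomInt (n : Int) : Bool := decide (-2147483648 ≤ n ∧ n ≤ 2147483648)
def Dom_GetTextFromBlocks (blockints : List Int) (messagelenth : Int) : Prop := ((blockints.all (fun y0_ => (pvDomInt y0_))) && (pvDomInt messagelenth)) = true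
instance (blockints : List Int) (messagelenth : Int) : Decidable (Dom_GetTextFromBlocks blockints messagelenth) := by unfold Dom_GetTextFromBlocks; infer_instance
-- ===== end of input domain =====

-- B replaces A's per-digit 256**i power/div/mod work by one divmod-by-256 pass per block
-- (digit count per block obtained in closed form from the block index); same result on Pre_.

-- ===== PORT A =====
-- inner loop body of A: state (blockmessage, blockint); chr(ascii) → Char.ofNat ascii.toNat,
-- exact under Pre_ (every ascii there is in [0, 256)); 256**i → 256 ^ i.toNat, exact since
-- every i produced by range(127, -1, -1) is ≥ 0.
def pvStepA (m L : Int) (st : List Char × Int) (i : Int) : List Char × Int :=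
  if L + i < m then
    (Char.ofNat (PySem.Int.floordiv st.2 ((256 : Int) ^ i.toNat)).toNat :: st.1,
     PySem.Int.mod st.2 ((256 : Int) ^ i.toNat))
  else st

def GetTextFromBlocks (blockints : List Int) (messagelenth : Int) : String :=
  let message : List Char := blockints.foldl
    (fun message blockint =>
      message ++ ((PySem.List.pyRange (128 - 1) (-1) (-1)).foldl
        (pvStepA messagelenth (message.length : Int)) (([] : List Char), blockint)).1)
    []
  PySem.Str.join " " (message.map (fun c => String.ofList [c]))

-- ===== PORT B =====
-- inner loop body of B: state (blockint, message); divmod(blockint, 256) ported componentwise.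
def pvStepB (st : Int × List Char) (_i : Int) : Int × List Char :=
  (PySem.Int.floordiv st.1 256,
   st.2 ++ [Char.ofNat (PySem.Int.mod st.1 256).toNat])

def GetTextFromBlocks_alt (blockints : List Int) (messagelenth : Int) : String :=
  let message : List Char := (PySem.List.enumerate blockints).foldl
    (fun message jb =>
      ((PySem.List.pyRange 0 (min 128 (messagelenth - 128 * jb.1)) 1).foldl
        pvStepB (jb.2, message)).2)
    []
  PySem.Str.join " " (message.map (fun c => String.ofList [c]))

-- ===== PRECONDITION & SPEC =====
-- Pre_ excludes inputs on which A raises (a negative block that gets decoded: chr(negative)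
-- is a ValueError) and blocks whose integer does not fit in the number of bytes decoded from
-- them: there A's leading chr receives the whole leftover quotient, raising for large values
-- and otherwise yielding a stray non-byte character outside the encoding's domain.
def Pre_GetTextFromBlocks (blockints : List Int) (messagelenth : Int) : Prop :=
  ∀ j : Nat, j < blockints.length →
    0 < min 128 (messagelenth - 128 * (j : Int)) →
      0 ≤ blockints[j]! ∧
      blockints[j]! < (256 : Int) ^ (min 128 (messagelenth - 128 * (j : Int))).toNat
instance (blockints : List Int) (messagelenth : Int) : Decidable (Pre_GetTextFromBlocks blockints messagelenth) := by unfold Pre_GetTextFromBlocks; infer_instance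
def pvWitness_GetTextFromBlocks : List Int × Int := ([72], 1)

def Spec_GetTextFromBlocks (blockints : List Int) (messagelenth : Int) (out : String) : Prop := out = GetTextFromBlocks_alt blockints messagelenth
instance (blockints : List Int) (messagelenth : Int) (out : String) : Decidable (Spec_GetTextFromBlocks blockints messagelenth out) := by unfold Spec_GetTextFromBlocks; infer_instance

-- ===== CLAIM (what is proved, stated in full; the proofs are below) =====
def Claim_equal_GetTextFromBlocks : Prop := ∀ (blockints : List Int) (messagelenth : Int), Dom_GetTextFromBlocks blockints messagelenth → Pre_GetTextFromBlocks blockints messagelenth → Spec_GetTextFromBlocks blockints messagelenth (GetTextFromBlocks blockints messagelenth)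

-- ===== LEMMAS AND PROOFS =====

-- little-endian base-256 digits as produced by B's divmod loop
def pvDigits (b : Int) : Nat → List Char
  | 0 => []
  | n + 1 => Char.ofNat (PySem.Int.mod b 256).toNat ::
      pvDigits (PySem.Int.floordiv b 256) n

-- little-endian digits as produced by A's descending power loop
def pvDigitsA (b : Int) : Nat → List Char
  | 0 => []
  | n + 1 => pvDigitsA (PySem.Int.mod b ((256 : Int) ^ n)) n ++
      [Char.ofNat (PySem.Int.floordiv b ((256 : Int) ^ n)).toNat]

lemma pvFoldA (m L : Int) : ∀ (n : Nat) (acc : List Char) (b : Int),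
    ((PySem.List.pyRange ((n : Int) - 1) (-1) (-1)).foldl (pvStepA m L) (acc, b)).1
      = pvDigitsA b (min n (m - L).toNat) ++ acc := by
  intro n
  induction n with
  | zero =>
    intro acc b
    rw [show ((0 : Nat) : Int) - 1 = -1 by norm_num,
        PySem.List.pyRange_neg_one_eq_nil (by norm_num)]
    simp [pvDigitsA]
  | succ n ih =>
    intro acc b
    rw [show ((n + 1 : Nat) : Int) - 1 = (n : Int) by push_cast; ring,
        PySem.List.pyRange_neg_one_cons (by omega)]
    simp only [List.foldl_cons]
    by_cases hact : L + (n : Int) < m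
    · have h1 : pvStepA m L (acc, b) (n : Int)
          = (Char.ofNat (PySem.Int.floordiv b ((256 : Int) ^ n)).toNat :: acc,
             PySem.Int.mod b ((256 : Int) ^ n)) := by
        simp [pvStepA, hact]
      rw [h1, ih]
      have hm1 : min n (m - L).toNat = n := by omega
      have hm2 : min (n + 1) (m - L).toNat = n + 1 := by omega
      rw [hm1, hm2]
      simp [pvDigitsA]
    · have h1 : pvStepA m L (acc, b) (n : Int) = (acc, b) := by
        simp [pvStepA, hact]
      rw [h1, ih]
      have hm : min (n + 1) (m - L).toNat = min n (m - L).toNat := by omega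
      rw [hm]

lemma pvFoldB : ∀ (l : List Int) (b : Int) (acc : List Char),
    (l.foldl pvStepB (b, acc)).2 = acc ++ pvDigits b l.length := by
  intro l
  induction l with
  | nil => intro b acc; simp [pvDigits]
  | cons x xs ih =>
    intro b acc
    simp only [List.foldl_cons, List.length_cons, pvStepB, pvDigits]
    rw [ih]
    simp

lemma pvModDiv (b : Int) (n : Nat) :
    (b % (256 : Int) ^ (n + 1)) / 256 = (b / 256) % (256 : Int) ^ n := by
  rw [Int.emod_def, Int.emod_def]
  rw [show (256 : Int) ^ (n + 1) = 256 * 256 ^ n by rw [pow_succ']]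
  rw [Int.ediv_ediv_of_nonneg (by norm_num : (0 : Int) ≤ 256)]
  rw [Int.sub_ediv_of_dvd _ (Dvd.dvd.mul_right (dvd_mul_right 256 (256 ^ n)) _)]
  congr 1
  rw [mul_assoc, Int.mul_ediv_cancel_left _ (by norm_num)]

lemma pvDigits_split : ∀ (n : Nat) (b : Int), 0 ≤ b → b < (256 : Int) ^ (n + 1) →
    pvDigits b (n + 1)
      = pvDigits (PySem.Int.mod b ((256 : Int) ^ n)) n ++
        [Char.ofNat (PySem.Int.floordiv b ((256 : Int) ^ n)).toNat] := by
  intro n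
  induction n with
  | zero =>
    intro b h0 h1
    simp only [pvDigits, pow_zero, List.nil_append]
    have hd : PySem.Int.floordiv b 1 = b := by
      rw [PySem.Int.floordiv_eq_ediv_of_pos (by norm_num)]; exact Int.ediv_one b
    have hm : PySem.Int.mod b 256 = b := by
      rw [PySem.Int.mod_eq_emod_of_pos (by norm_num)]
      exact Int.emod_eq_of_lt h0 (by simpa using h1)
    rw [hd, hm]
  | succ n ih =>
    intro b h0 h1
    have hp1 : (0 : Int) < 256 := by norm_num
    have hpn : (0 : Int) < (256 : Int) ^ n := by positivity
    have hpn1 : (0 : Int) < (256 : Int) ^ (n + 1) := by positivity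
    have hq0 : 0 ≤ PySem.Int.floordiv b 256 := by
      rw [PySem.Int.floordiv_eq_ediv_of_pos hp1]
      exact Int.ediv_nonneg h0 (by norm_num)
    have hq1 : PySem.Int.floordiv b 256 < (256 : Int) ^ (n + 1) := by
      rw [PySem.Int.floordiv_eq_ediv_of_pos hp1]
      rw [Int.ediv_lt_iff_lt_mul hp1]
      calc b < (256 : Int) ^ (n + 1 + 1) := h1
        _ = (256 : Int) ^ (n + 1) * 256 := by rw [pow_succ]
    have hL : pvDigits b (n + 1 + 1)
        = Char.ofNat (PySem.Int.mod b 256).toNat ::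
          pvDigits (PySem.Int.floordiv b 256) (n + 1) := rfl
    have hR : pvDigits (PySem.Int.mod b ((256 : Int) ^ (n + 1))) (n + 1)
        = Char.ofNat (PySem.Int.mod (PySem.Int.mod b ((256 : Int) ^ (n + 1))) 256).toNat ::
          pvDigits (PySem.Int.floordiv (PySem.Int.mod b ((256 : Int) ^ (n + 1))) 256) n := rfl
    rw [hL, hR, ih _ hq0 hq1]
    rw [PySem.Int.mod_eq_emod_of_pos hpn1, PySem.Int.mod_eq_emod_of_pos hp1,
        PySem.Int.mod_eq_emod_of_pos hp1, PySem.Int.mod_eq_emod_of_pos hpn,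
        PySem.Int.floordiv_eq_ediv_of_pos hp1, PySem.Int.floordiv_eq_ediv_of_pos hp1,
        PySem.Int.floordiv_eq_ediv_of_pos hpn, PySem.Int.floordiv_eq_ediv_of_pos hpn1]
    rw [Int.emod_emod_of_dvd b (dvd_pow_self (256 : Int) (Nat.succ_ne_zero n))]
    rw [pvModDiv]
    rw [Int.ediv_ediv_of_nonneg (by norm_num : (0 : Int) ≤ 256), ← pow_succ']
    simp

lemma pvDigitsA_eq : ∀ (n : Nat) (b : Int), 0 ≤ b → b < (256 : Int) ^ n →
    pvDigitsA b n = pvDigits b n := by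
  intro n
  induction n with
  | zero => intro b _ _; rfl
  | succ n ih =>
    intro b h0 h1
    have hpos : (0 : Int) < (256 : Int) ^ n := by positivity
    simp only [pvDigitsA]
    rw [ih _ (PySem.Int.mod_nonneg b hpos) (PySem.Int.mod_lt b hpos)]
    exact (pvDigits_split n b h0 h1).symm

lemma pvDigits_length : ∀ (n : Nat) (b : Int), (pvDigits b n).length = n := by
  intro n
  induction n with
  | zero => intro b; rfl
  | succ n ih => intro b; simp [pvDigits, ih]

lemma pvOuter (m : Int) : ∀ (bs : List Int) (j : Nat) (msg : List Char),
    (∀ i : Nat, i < bs.length →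
      0 < min 128 (m - 128 * ((j + i : Nat) : Int)) →
        0 ≤ bs[i]! ∧ bs[i]! < (256 : Int) ^ (min 128 (m - 128 * ((j + i : Nat) : Int))).toNat) →
    (msg.length : Int) = min (max m 0) (128 * (j : Int)) →
    bs.foldl
      (fun message blockint =>
        message ++ ((PySem.List.pyRange (128 - 1) (-1) (-1)).foldl
          (pvStepA m (message.length : Int)) (([] : List Char), blockint)).1)
      msg
    = (PySem.List.enumerate bs (j : Int)).foldl
        (fun message jb =>
          ((PySem.List.pyRange 0 (min 128 (m - 128 * jb.1)) 1).foldl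
            pvStepB (jb.2, message)).2)
        msg := by
  intro bs
  induction bs with
  | nil => intro j msg _ _; simp [PySem.List.enumerate_nil]
  | cons b bs ih =>
    intro j msg hpre hlen
    rw [PySem.List.enumerate_cons]
    simp only [List.foldl_cons]
    have h127 : (128 - 1 : Int) = ((128 : Nat) : Int) - 1 := by norm_num
    set K : Nat := (min 128 (m - 128 * (j : Int))).toNat with hKdef
    have hdig : pvDigitsA b (min 128 (m - (msg.length : Int)).toNat) = pvDigits b K := by
      have hK : min 128 (m - (msg.length : Int)).toNat = K := by omega
      rw [hK]
      by_cases hKpos : 0 < min 128 (m - 128 * (j : Int))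
      · have hb := hpre 0 (by simp) (by simpa using hKpos)
        simp only [List.getElem!_eq_getElem?_getD, List.getElem?_cons_zero,
          Option.getD_some, Nat.add_zero] at hb
        exact pvDigitsA_eq K b hb.1 hb.2
      · have hK0 : K = 0 := by omega
        rw [hK0]; rfl
    have hA : msg ++ ((PySem.List.pyRange (128 - 1) (-1) (-1)).foldl
        (pvStepA m (msg.length : Int)) (([] : List Char), b)).1
        = msg ++ pvDigits b K := by
      rw [h127, pvFoldA, List.append_nil, hdig]
    have hB : ((PySem.List.pyRange 0 (min 128 (m - 128 * (j : Int))) 1).foldl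
        pvStepB (b, msg)).2 = msg ++ pvDigits b K := by
      rw [pvFoldB]
      congr 1
      rw [PySem.List.length_pyRange_one]
      congr 1
      omega
    rw [hA, hB]
    have hlen' : ((msg ++ pvDigits b K).length : Int)
        = min (max m 0) (128 * ((j + 1 : Nat) : Int)) := by
      rw [List.length_append, pvDigits_length]
      push_cast
      omega
    have hpre' : ∀ i : Nat, i < bs.length →
        0 < min 128 (m - 128 * (((j + 1) + i : Nat) : Int)) →
          0 ≤ bs[i]! ∧ bs[i]! < (256 : Int) ^ (min 128 (m - 128 * (((j + 1) + i : Nat) : Int))).toNat := by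
      intro i hi hk
      have hc : ((j + 1) + i : Nat) = (j + (i + 1) : Nat) := by omega
      rw [hc] at hk ⊢
      have := hpre (i + 1) (by simpa using hi) hk
      simpa using this
    have h2 := ih (j + 1) (msg ++ pvDigits b K) hpre' hlen'
    rw [h2]
    norm_cast

-- ===== VERDICT (by name: the statement is the Claim_ definition above) =====
theorem GetTextFromBlocks_spec : Claim_equal_GetTextFromBlocks := by
  intro blockints messagelenth _hdom hpre
  unfold Spec_GetTextFromBlocks GetTextFromBlocks GetTextFromBlocks_alt
  have h := pvOuter messagelenth blockints 0 []
    (by intro i hi hk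
        simp only [Nat.zero_add] at hk ⊢
        exact hpre i hi hk)
    (by simp)
  simp only [Nat.cast_zero] at h
  rw [h]
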